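-- pv_equiv track=rewrite | github.com/pypi-data/pypi-mirror-401 | packages/textseal/textseal-0.0.4-py3-none-any.whl/textseal/wmtraining/kgram.py | get_unique_kgrams_per_source
-- ===== SOURCE A (Python) =====
-- from collections import defaultdict, Counter
--
-- def get_unique_kgrams_per_source(source_kgram_counts: dict[str, Counter]) -> dict[str, set]:
--     """
--     Identify k-grams that are unique to each training source (don't overlap with other sources).
--     Args:
--         source_kgram_counts: Dictionary mapping source names to k-gram counters
--     Returns:
--         Dictionary mapping source names to sets of unique k-grams
--     """
--     unique_kgrams = {}
--     source_names = list(source_kgram_counts.keys())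
--
--     for source_name in source_names:
--         source_kgrams = set(source_kgram_counts[source_name].keys())
--
--         # Find k-grams that appear in other sources
--         overlapping_kgrams = set()
--         for other_source in source_names:
--             if other_source != source_name:
--                 other_kgrams = set(source_kgram_counts[other_source].keys())
--                 overlapping_kgrams.update(source_kgrams.intersection(other_kgrams))
--
--         # Unique k-grams are those that don't overlap with any other source
--         unique_kgrams[source_name] = source_kgrams - overlapping_kgrams
--
--     return unique_kgrams
-- ===== SOURCE B (Python) =====
-- from collections import Counter
--
--
-- def get_unique_kgrams_per_source(source_kgram_counts):
--     # One pass: count in how many sources each k-gram occurs,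
--     # then keep the k-grams that occur in exactly one source.
--     n_sources = Counter()
--     for counter in source_kgram_counts.values():
--         n_sources.update(counter.keys())
--     return {source: {kgram for kgram in counter if n_sources[kgram] == 1}
--             for source, counter in source_kgram_counts.items()}
-- ===== Notes on version B (the rewrite author's own statement) =====
-- stated objective: faster
-- what changed: Replaces A's quadratic all-pairs scan (for each source, intersect its k-gram set with every other source's set) by a single counting pass that tallies in how many sources each k-gram occurs, then keeps per source the k-grams with count 1.
import Mathlib
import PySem

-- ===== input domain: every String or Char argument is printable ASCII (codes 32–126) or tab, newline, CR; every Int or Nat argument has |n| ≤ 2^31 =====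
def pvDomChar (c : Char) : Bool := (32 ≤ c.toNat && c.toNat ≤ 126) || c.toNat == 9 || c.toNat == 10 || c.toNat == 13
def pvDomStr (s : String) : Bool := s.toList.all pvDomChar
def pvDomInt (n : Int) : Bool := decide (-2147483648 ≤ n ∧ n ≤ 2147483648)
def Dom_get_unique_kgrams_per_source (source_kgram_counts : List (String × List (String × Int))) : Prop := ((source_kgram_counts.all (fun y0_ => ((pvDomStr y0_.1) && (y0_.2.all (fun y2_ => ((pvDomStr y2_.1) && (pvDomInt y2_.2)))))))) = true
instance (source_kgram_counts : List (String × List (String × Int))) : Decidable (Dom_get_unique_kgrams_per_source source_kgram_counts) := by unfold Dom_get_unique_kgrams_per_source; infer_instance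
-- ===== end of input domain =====

-- B replaces A's quadratic all-pairs intersection scan by one counting pass over all
-- sources (how many sources contain each k-gram), keeping k-grams whose count is 1.

-- ===== PORT A =====
-- set(source_kgram_counts[name].keys()) — the dict argument is decoded with Dict.ofList
def pvKeysOf (d : PySem.Dict String (List (String × Int))) (name : String) : PySem.Set String :=
  PySem.Set.ofList ((d.getD name []).map (·.1))

-- the body of A's outer loop: the set stored for one source
def pvAval (d : PySem.Dict String (List (String × Int))) (source_names : List String)
    (source_name : String) : List String :=
  let source_kgrams : PySem.Set String := pvKeysOf d source_name
  let overlapping_kgrams : PySem.Set String :=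
    source_names.foldl (fun ov other_source =>
      if other_source ≠ source_name then
        PySem.Set.update ov (PySem.Set.inter source_kgrams (pvKeysOf d other_source))
      else ov) PySem.Set.empty
  PySem.Set.diff source_kgrams overlapping_kgrams

def get_unique_kgrams_per_source (source_kgram_counts : List (String × List (String × Int))) : List (String × List String) :=
  let d : PySem.Dict String (List (String × Int)) := PySem.Dict.ofList source_kgram_counts
  let source_names : List String := d.keys
  (source_names.foldl
    (fun (unique_kgrams : PySem.Dict String (List String)) source_name =>
      unique_kgrams.insert source_name (pvAval d source_names source_name))
    PySem.Dict.empty).items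

-- ===== PORT B =====
-- {kgram for kgram in counter if n_sources[kgram] == 1}
def pvBval (n_sources : PySem.Dict String Int) (counter : List (String × Int)) : List String :=
  (PySem.Set.ofList (counter.map (·.1))).filter (fun kgram => n_sources.getD kgram 0 == 1)

def get_unique_kgrams_per_source_alt (source_kgram_counts : List (String × List (String × Int))) : List (String × List String) :=
  let d : PySem.Dict String (List (String × Int)) := PySem.Dict.ofList source_kgram_counts
  let n_sources : PySem.Dict String Int :=
    d.values.foldl (fun m counter =>
      (PySem.Set.ofList (counter.map (·.1))).foldl (fun m k => m.modify k 0 (· + 1)) m)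
      PySem.Dict.empty
  (d.items.foldl
    (fun (r : PySem.Dict String (List String)) p => r.insert p.1 (pvBval n_sources p.2))
    PySem.Dict.empty).items

-- ===== PRECONDITION & SPEC =====
def Spec_get_unique_kgrams_per_source (source_kgram_counts : List (String × List (String × Int))) (out : List (String × List String)) : Prop := out = get_unique_kgrams_per_source_alt source_kgram_counts
instance (source_kgram_counts : List (String × List (String × Int))) (out : List (String × List String)) : Decidable (Spec_get_unique_kgrams_per_source source_kgram_counts out) := by unfold Spec_get_unique_kgrams_per_source; infer_instance

-- ===== CLAIM (what is proved, stated in full; the proofs are below) =====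
def Claim_equal_get_unique_kgrams_per_source : Prop := ∀ (source_kgram_counts : List (String × List (String × Int))), Dom_get_unique_kgrams_per_source source_kgram_counts → Spec_get_unique_kgrams_per_source source_kgram_counts (get_unique_kgrams_per_source source_kgram_counts)

-- ===== LEMMAS AND PROOFS =====

-- value of B's counting pass: how many counters (by first components) contain k
theorem pv_ns_getD (vs : List (List (String × Int))) (m : PySem.Dict String Int) (k : String) :
    (vs.foldl (fun m counter =>
      (PySem.Set.ofList (counter.map (·.1))).foldl (fun m k => m.modify k 0 (· + 1)) m) m).getD k 0
    = m.getD k 0 + vs.countP (fun v => decide (k ∈ PySem.Set.ofList (v.map (·.1)))) := by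
  induction vs generalizing m with
  | nil => simp
  | cons v vs ih =>
    rw [List.foldl_cons, ih, PySem.Dict.getD_foldl_modify_add_one, List.countP_cons]
    have hc : (PySem.Set.ofList (v.map (·.1))).count k =
        if k ∈ PySem.Set.ofList (v.map (·.1)) then 1 else 0 :=
      (PySem.Set.nodup_ofList _).count
    rw [hc]
    by_cases h : k ∈ PySem.Set.ofList (v.map (·.1)) <;> simp [h] <;> try omega

-- membership in A's overlapping set
theorem pv_mem_overlap (names : List String) (f : String → PySem.Set String)
    (skg : PySem.Set String) (name k : String) (ov : PySem.Set String) :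
    k ∈ names.foldl (fun ov other =>
        if other ≠ name then PySem.Set.update ov (PySem.Set.inter skg (f other)) else ov) ov
    ↔ k ∈ ov ∨ ∃ other ∈ names, other ≠ name ∧ k ∈ skg ∧ k ∈ f other := by
  induction names generalizing ov with
  | nil => simp
  | cons o names ih =>
    rw [List.foldl_cons]
    by_cases h : o ≠ name
    · simp only [if_pos h, ih, PySem.Set.mem_update, PySem.Set.mem_inter, List.mem_cons]
      constructor
      · rintro (((h1 | ⟨h1, h2⟩) ) | ⟨x, hx, hne, hks, hkf⟩)
        · exact Or.inl h1
        · exact Or.inr ⟨o, Or.inl rfl, h, h1, h2⟩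
        · exact Or.inr ⟨x, Or.inr hx, hne, hks, hkf⟩
      · rintro (h1 | ⟨x, (rfl | hx), hne, hks, hkf⟩)
        · exact Or.inl (Or.inl h1)
        · exact Or.inl (Or.inr ⟨hks, hkf⟩)
        · exact Or.inr ⟨x, hx, hne, hks, hkf⟩
    · push Not at h
      subst h
      rw [if_neg (by simp)]
      simp only [ih, List.mem_cons]
      constructor
      · rintro (h1 | ⟨x, hx, hne, hks, hkf⟩)
        · exact Or.inl h1
        · exact Or.inr ⟨x, Or.inr hx, hne, hks, hkf⟩
      · rintro (h1 | ⟨x, (rfl | hx), hne, hks, hkf⟩)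
        · exact Or.inl h1
        · exact absurd rfl hne
        · exact Or.inr ⟨x, hx, hne, hks, hkf⟩

-- ===== VERDICT (by name: the statement is the Claim_ definition above) =====
-- the per-source sets agree: "not in any other source" = "source-occurrence count is 1"
theorem pv_val_eq (l : List (String × List (String × Int)))
    (p : String × List (String × Int))
    (hp : p ∈ (PySem.Dict.ofList l).items) :
    pvAval (PySem.Dict.ofList l) (PySem.Dict.ofList l).keys p.1
    = pvBval ((PySem.Dict.ofList l).values.foldl (fun m counter =>
        (PySem.Set.ofList (counter.map (·.1))).foldl (fun m k => m.modify k 0 (· + 1)) m)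
        PySem.Dict.empty) p.2 := by
  set d := PySem.Dict.ofList l with hd
  have hnd : d.keys.Nodup := PySem.Dict.nodup_keys_ofList l
  have hv : d.getD p.1 [] = p.2 := PySem.Dict.getD_of_mem_items d hp hnd []
  unfold pvAval pvBval
  have hK : pvKeysOf d p.1 = PySem.Set.ofList (p.2.map (·.1)) := by
    rw [pvKeysOf, hv]
  simp only [hK, PySem.Set.diff]
  apply List.filter_congr
  intro k hk
  -- membership of k in the overlapping set, as an existential over the items
  have hover : (d.keys.foldl (fun ov other =>
      if other ≠ p.1 then
        PySem.Set.update ov (PySem.Set.inter (PySem.Set.ofList (p.2.map (·.1))) (pvKeysOf d other))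
      else ov) PySem.Set.empty).contains k = true
      ↔ ∃ q ∈ d.items, q.1 ≠ p.1 ∧ k ∈ PySem.Set.ofList (q.2.map (·.1)) := by
    rw [PySem.Set.contains_iff, pv_mem_overlap]
    constructor
    · rintro (h0 | ⟨other, hmem, hne, _, hkf⟩)
      · exact absurd h0 (by simp [PySem.Set.empty])
      · have : other ∈ d.items.map (·.1) := hmem
        obtain ⟨q, hq, rfl⟩ := List.mem_map.mp this
        refine ⟨q, hq, hne, ?_⟩
        rwa [pvKeysOf, PySem.Dict.getD_of_mem_items d hq hnd] at hkf
    · rintro ⟨q, hq, hne, hkq⟩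
      refine Or.inr ⟨q.1, List.mem_map.mpr ⟨q, hq, rfl⟩, hne, hk, ?_⟩
      rwa [pvKeysOf, PySem.Dict.getD_of_mem_items d hq hnd]
  -- value of the counter at k
  have hns : (d.values.foldl (fun m counter =>
      (PySem.Set.ofList (counter.map (·.1))).foldl (fun m k => m.modify k 0 (· + 1)) m)
      PySem.Dict.empty).getD k 0
      = (d.items.countP (fun q => decide (k ∈ PySem.Set.ofList (q.2.map (·.1)))) : Int) := by
    rw [pv_ns_getD, PySem.Dict.getD_empty]
    have : d.values = d.items.map (·.2) := rfl
    rw [this, List.countP_map]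
    simp only [zero_add]
    rfl
  rw [Bool.eq_iff_iff, Bool.not_eq_eq_eq_not, Bool.not_true, ← Bool.not_eq_true, hover, hns]
  rw [beq_iff_eq]
  -- split the items at p
  obtain ⟨l1, l2, hsplit⟩ := List.append_of_mem hp
  have hnd2 : ((l1 ++ p :: l2).map (·.1)).Nodup := by rw [← hsplit]; exact hnd
  rw [List.map_append, List.map_cons, List.nodup_append] at hnd2
  obtain ⟨hnd1, hndc, hdisj⟩ := hnd2
  rw [List.nodup_cons] at hndc
  have hcount : d.items.countP (fun q => decide (k ∈ PySem.Set.ofList (q.2.map (·.1))))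
      = l1.countP (fun q => decide (k ∈ PySem.Set.ofList (q.2.map (·.1))))
      + l2.countP (fun q => decide (k ∈ PySem.Set.ofList (q.2.map (·.1)))) + 1 := by
    rw [hsplit, List.countP_append, List.countP_cons]
    simp [hk]
    omega
  constructor
  · -- no overlap → exactly one source
    intro hno
    have h1 : l1.countP (fun q => decide (k ∈ PySem.Set.ofList (q.2.map (·.1)))) = 0 := by
      rw [List.countP_eq_zero]
      intro q hq hkq
      exact hno ⟨q, by rw [hsplit]; exact List.mem_append_left _ hq,
        fun he => hdisj q.1 (List.mem_map.mpr ⟨q, hq, rfl⟩) p.1 List.mem_cons_self he,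
        by simpa using hkq⟩
    have h2 : l2.countP (fun q => decide (k ∈ PySem.Set.ofList (q.2.map (·.1)))) = 0 := by
      rw [List.countP_eq_zero]
      intro q hq hkq
      exact hno ⟨q, by rw [hsplit]; exact List.mem_append_right _ (List.mem_cons_of_mem _ hq),
        fun he => hndc.1 (List.mem_map.mpr ⟨q, hq, he⟩),
        by simpa using hkq⟩
    rw [hcount, h1, h2]
    norm_num
  · -- exactly one source → no other source contains k
    intro hone
    rw [hcount] at hone
    have hone' : l1.countP (fun q => decide (k ∈ PySem.Set.ofList (q.2.map (·.1))))
        + l2.countP (fun q => decide (k ∈ PySem.Set.ofList (q.2.map (·.1)))) + 1 = 1 := by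
      exact_mod_cast hone
    rintro ⟨q, hq, hne, hkq⟩
    rw [hsplit] at hq
    rcases List.mem_append.mp hq with h1 | h1
    · have : 0 < l1.countP (fun q => decide (k ∈ PySem.Set.ofList (q.2.map (·.1)))) :=
        List.countP_pos_iff.mpr ⟨q, h1, by simpa using hkq⟩
      omega
    · rcases List.mem_cons.mp h1 with rfl | h2
      · exact hne rfl
      · have : 0 < l2.countP (fun q => decide (k ∈ PySem.Set.ofList (q.2.map (·.1)))) :=
          List.countP_pos_iff.mpr ⟨q, h2, by simpa using hkq⟩
        omega

-- ===== VERDICT (by name: the statement is the Claim_ definition above) =====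
theorem get_unique_kgrams_per_source_spec : Claim_equal_get_unique_kgrams_per_source := by
  intro l _
  unfold Spec_get_unique_kgrams_per_source
  unfold get_unique_kgrams_per_source get_unique_kgrams_per_source_alt
  simp only []
  have hnd : (PySem.Dict.ofList l).keys.Nodup := PySem.Dict.nodup_keys_ofList l
  rw [PySem.Dict.items_foldl_insert_fresh (PySem.Dict.ofList l).keys (fun n => n)
        (fun n => pvAval (PySem.Dict.ofList l) (PySem.Dict.ofList l).keys n) PySem.Dict.empty
        (fun a _ => PySem.Dict.contains_empty a) (by simpa using hnd),
      PySem.Dict.items_foldl_insert_fresh (PySem.Dict.ofList l).items (fun p => p.1)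
        (fun p => pvBval _ p.2) PySem.Dict.empty
        (fun a _ => PySem.Dict.contains_empty a.1) hnd,
      show (PySem.Dict.empty : PySem.Dict String (List String)).items = [] from rfl,
      List.nil_append, List.nil_append]
  refine Eq.trans (b := (PySem.Dict.ofList l).items.map
      ((fun n => (n, pvAval (PySem.Dict.ofList l) (PySem.Dict.ofList l).keys n)) ∘ (·.1))) ?_ ?_
  · exact List.map_map
  · apply List.map_congr_left
    intro p hp
    simp only [Function.comp]
    rw [pv_val_eq l p hp]
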